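-- pv_equiv track=rewrite | github.com/woweizhi/CBB-520-assignment3 | src/srcGroup7/util.py | find_triplet_motifs
-- ===== SOURCE A (Python) =====
-- from collections import defaultdict
--
-- def find_triplet_motifs(protein_sequence,range_list=[1,2,3]):
--
--   repeat_dictionary = defaultdict( lambda : 0 )
--
--   for len_motif in range_list:
--
--     for i in range(len(protein_sequence) - len_motif*3 ):
--         if (protein_sequence[i+len_motif*0:i+len_motif*1] == protein_sequence[i+len_motif*1:i+len_motif*2]) and \
--            (protein_sequence[i+len_motif*1:i+len_motif*2] == protein_sequence[i+len_motif*2:i+len_motif*3]) :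
--            repeat_dictionary[protein_sequence[i:i+len_motif]] += 1
--
--   return dict(repeat_dictionary)
-- ===== SOURCE B (Python) =====
-- def find_triplet_motifs(protein_sequence, range_list=[1, 2, 3]):
--     s = protein_sequence
--     n = len(s)
--     counts = {}
--     for L in range_list:
--         # table of single-character agreements at offset L, then its prefix sums
--         match = [1 if s[k] == s[k + L] else 0 for k in range(n - L)]
--         prefix = [0]
--         total = 0
--         for v in match:
--             total += v
--             prefix.append(total)
--         for i in range(n - 3 * L):
--             if prefix[i + 2 * L] - prefix[i] == 2 * L:
--                 key = s[i:i + L]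
--                 counts[key] = counts.get(key, 0) + 1
--     return counts
-- ===== Notes on version B (the rewrite author's own statement) =====
-- stated objective: alternative
-- what changed: Replaces the three O(L) slice comparisons per position with a per-length boolean match table plus prefix sums, so each position is validated by one O(1) window-sum check.
-- outside the precondition, e.g. on find_triplet_motifs('ABCDEF', [-1]): A returns {'': 6}, B raises IndexError
import Mathlib
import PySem

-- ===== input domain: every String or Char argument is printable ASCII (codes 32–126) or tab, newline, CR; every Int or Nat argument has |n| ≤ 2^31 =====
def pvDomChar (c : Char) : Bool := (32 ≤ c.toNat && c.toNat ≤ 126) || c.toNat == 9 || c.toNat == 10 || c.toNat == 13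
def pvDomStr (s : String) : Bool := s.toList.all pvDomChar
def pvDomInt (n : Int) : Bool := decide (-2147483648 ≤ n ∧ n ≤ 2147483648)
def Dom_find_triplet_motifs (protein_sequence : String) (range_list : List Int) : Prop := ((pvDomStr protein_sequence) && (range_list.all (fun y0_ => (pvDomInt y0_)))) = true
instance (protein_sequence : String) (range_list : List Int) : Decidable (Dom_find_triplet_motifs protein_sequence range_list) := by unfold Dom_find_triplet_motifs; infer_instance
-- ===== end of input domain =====

-- B replaces A's three slice comparisons per position by a per-length match table with prefix
-- sums (one window-sum check per position): a differently-shaped pass over the sequence.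

-- ===== PORT A =====
def find_triplet_motifs (protein_sequence : String) (range_list : List Int) : List (String × Int) :=
  let cs := protein_sequence.toList
  (range_list.foldl (fun (d : PySem.Dict String Int) len_motif =>
      (PySem.List.pyRange 0 ((cs.length : Int) - len_motif * 3) 1).foldl (fun d i =>
        if PySem.List.slice cs (some (i + len_motif * 0)) (some (i + len_motif * 1)) =
             PySem.List.slice cs (some (i + len_motif * 1)) (some (i + len_motif * 2)) ∧
           PySem.List.slice cs (some (i + len_motif * 1)) (some (i + len_motif * 2)) =
             PySem.List.slice cs (some (i + len_motif * 2)) (some (i + len_motif * 3))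
        then d.modify (String.ofList (PySem.List.slice cs (some i) (some (i + len_motif)))) 0 (· + 1)
        else d) d)
    PySem.Dict.empty).items

-- ===== PORT B =====
def find_triplet_motifs_alt (protein_sequence : String) (range_list : List Int) : List (String × Int) :=
  let cs := protein_sequence.toList
  let n : Int := cs.length
  (range_list.foldl (fun (d : PySem.Dict String Int) L =>
      -- `s[k]`/`s[k+L]` are always in range on the admitted inputs (0 ≤ L), so the `.getD ' '`
      -- default of the exact `pyGet?` primitive is never used
      let m : List Int := (PySem.List.pyRange 0 (n - L) 1).map (fun k =>
        if (PySem.List.pyGet? cs k).getD ' ' = (PySem.List.pyGet? cs (k + L)).getD ' ' then 1 else 0)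
      let tp := m.foldl (fun (tp : Int × List Int) v => (tp.1 + v, tp.2 ++ [tp.1 + v])) (0, [0])
      (PySem.List.pyRange 0 (n - 3 * L) 1).foldl (fun d i =>
        if (PySem.List.pyGet? tp.2 (i + 2 * L)).getD 0 - (PySem.List.pyGet? tp.2 i).getD 0 = 2 * L
        then
          let key := String.ofList (PySem.List.slice cs (some i) (some (i + L)))
          d.insert key (d.getD key 0 + 1)
        else d) d)
    PySem.Dict.empty).items

-- ===== PRECONDITION & SPEC =====
-- Pre_ excludes negative motif lengths: they are outside the task's natural domain, and there
-- A's negative-index slice wraparound yields accidental counts of the empty-string key while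
-- B's table construction indexes past the end and raises.
def Pre_find_triplet_motifs (protein_sequence : String) (range_list : List Int) : Prop :=
  ∀ L ∈ range_list, 0 ≤ L
instance (protein_sequence : String) (range_list : List Int) : Decidable (Pre_find_triplet_motifs protein_sequence range_list) := by unfold Pre_find_triplet_motifs; infer_instance
def pvWitness_find_triplet_motifs : String × List Int := ("ABABABAB", [1, 2, 3])
def Spec_find_triplet_motifs (protein_sequence : String) (range_list : List Int) (out : List (String × Int)) : Prop := out = find_triplet_motifs_alt protein_sequence range_list
instance (protein_sequence : String) (range_list : List Int) (out : List (String × Int)) : Decidable (Spec_find_triplet_motifs protein_sequence range_list out) := by unfold Spec_find_triplet_motifs; infer_instance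

-- ===== CLAIM (what is proved, stated in full; the proofs are below) =====
def Claim_equal_find_triplet_motifs : Prop := ∀ (protein_sequence : String) (range_list : List Int), Dom_find_triplet_motifs protein_sequence range_list → Pre_find_triplet_motifs protein_sequence range_list → Spec_find_triplet_motifs protein_sequence range_list (find_triplet_motifs protein_sequence range_list)

-- ===== LEMMAS AND PROOFS =====
theorem pref_char (m : List Int) (t : Int) (p : List Int) :
    m.foldl (fun (tp : Int × List Int) v => (tp.1 + v, tp.2 ++ [tp.1 + v])) (t, p)
      = (t + m.sum, p ++ (List.range m.length).map (fun j => t + (m.take (j+1)).sum)) := by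
  induction m generalizing t p with
  | nil => simp
  | cons v m ih =>
    simp only [List.foldl_cons, ih, List.length_cons, List.sum_cons, List.range_succ_eq_map,
      List.map_cons, List.map_map, List.take_succ_cons, List.sum_cons]
    refine Prod.ext (by ring) ?_
    simp [Function.comp_def, add_assoc, List.append_assoc]

theorem pref_get (m : List Int) (j : Nat) (hj : j ≤ m.length) :
    ((0:Int) :: (List.range m.length).map (fun j => (m.take (j+1)).sum))[j]? = some ((m.take j).sum) := by
  cases j with
  | zero => simp
  | succ j =>
    simp only [List.getElem?_cons_succ, List.getElem?_map, List.getElem?_range (by omega : j < m.length)]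
    rfl

theorem take_drop_eq_iff (cs : List Char) (a b l : Nat) :
    (cs.drop a).take l = (cs.drop b).take l ↔ ∀ t < l, cs[a+t]? = cs[b+t]? := by
  rw [List.ext_getElem?_iff]
  constructor
  · intro h t ht
    have := h t
    simpa [List.getElem?_take, List.getElem?_drop, ht] using this
  · intro h i
    simp only [List.getElem?_take, List.getElem?_drop]
    by_cases hi : i < l
    · simpa [hi] using h i hi
    · simp [hi]

theorem window_iff (cs : List Char) (l j : Nat) (h : j + 3*l < cs.length) :
    ((((List.range (cs.length - l)).map (fun k => if cs[k]? = cs[k+l]? then (1:Int) else 0)).take (j+2*l)).sum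
      - (((List.range (cs.length - l)).map (fun k => if cs[k]? = cs[k+l]? then (1:Int) else 0)).take j).sum = 2*(l:Int))
      ↔ ∀ t < 2*l, cs[j+t]? = cs[j+t+l]? := by
  rw [← List.map_take, ← List.map_take, List.take_range, List.take_range,
    Nat.min_eq_left (by omega), Nat.min_eq_left (by omega),
    PySem.List.sum_map_ite_one_zero', PySem.List.sum_map_ite_one_zero',
    List.range_add, List.countP_append]
  set p := fun k : Nat => decide (cs[k]? = cs[k+l]?) with hp
  have hlen : ((List.range (2*l)).map (j + ·)).length = 2*l := by simp
  have hle : ((List.range (2*l)).map (j + ·)).countP p ≤ 2*l := by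
    calc ((List.range (2*l)).map (j + ·)).countP p ≤ _ := List.countP_le_length
    _ = 2*l := hlen
  constructor
  · intro hc t ht
    have hc2 : ((List.range (2*l)).map (j + ·)).countP p = 2*l := by
      push_cast at hc; omega
    have := List.countP_eq_length.1 (by rw [hc2, hlen])
    have := this (j + t) (List.mem_map_of_mem (List.mem_range.2 ht))
    simpa [hp] using this
  · intro hall
    have h2 : ∀ x ∈ (List.range (2*l)).map (j + ·), p x := by
      intro x hx
      simp only [List.mem_map, List.mem_range] at hx
      obtain ⟨t, ht, rfl⟩ := hx
      simpa [hp] using hall t ht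
    have hc2 : ((List.range (2*l)).map (j + ·)).countP p = 2*l := by
      rw [List.countP_eq_length.2 h2, hlen]
    push_cast [hc2]; ring

theorem pair_iff (cs : List Char) (l j : Nat) :
    ((∀ t < l, cs[j+t]? = cs[j+l+t]?) ∧ (∀ t < l, cs[j+l+t]? = cs[j+2*l+t]?)) ↔
      ∀ t < 2*l, cs[j+t]? = cs[j+t+l]? := by
  constructor
  · rintro ⟨h1, h2⟩ t ht
    by_cases htl : t < l
    · have := h1 t htl
      rwa [show j+l+t = j+t+l by omega] at this
    · have := h2 (t - l) (by omega)
      rwa [show j+l+(t-l) = j+t by omega, show j+2*l+(t-l) = j+t+l by omega] at this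
  · intro h
    constructor
    · intro t ht
      have := h t (by omega)
      rw [show j+l+t = j+t+l by omega]
      exact this
    · intro t ht
      have := h (l + t) (by omega)
      rw [show j+(l+t) = j+l+t by omega] at this
      rw [show j+2*l+t = j+l+t+l by omega]
      exact this

-- ===== VERDICT (by name: the statement is the Claim_ definition above) =====
theorem find_triplet_motifs_spec : Claim_equal_find_triplet_motifs := by
  intro s rl _hDom hPre
  unfold Spec_find_triplet_motifs find_triplet_motifs find_triplet_motifs_alt
  simp only []
  refine congrArg PySem.Dict.items ?_
  apply PySem.List.foldl_congr_mem
  intro d L hmem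
  have hL : 0 ≤ L := hPre L hmem
  obtain ⟨l, rfl⟩ : ∃ l : Nat, L = (l : Int) := ⟨L.toNat, (Int.toNat_of_nonneg hL).symm⟩
  set cs := s.toList with hcs
  by_cases hsz : 3*l < cs.length
  case neg =>
    -- both ranges are empty
    have e1 : ((cs.length : Int) - (l:Int)*3).toNat = 0 := by omega
    have e2 : ((cs.length : Int) - 3*(l:Int)).toNat = 0 := by omega
    rw [PySem.List.pyRange_one 0 ((cs.length:Int) - (l:Int)*3),
      PySem.List.pyRange_one 0 ((cs.length:Int) - 3*(l:Int))]
    simp [e1, e2]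
  case pos =>
    have hln : l ≤ cs.length := by omega
    -- the match table
    have hm : (PySem.List.pyRange 0 ((cs.length:Int) - (l:Int)) 1).map (fun k =>
        if (PySem.List.pyGet? cs k).getD ' ' = (PySem.List.pyGet? cs (k + (l:Int))).getD ' ' then (1:Int) else 0)
        = (List.range (cs.length - l)).map (fun k => if cs[k]? = cs[k+l]? then (1:Int) else 0) := by
      rw [PySem.List.pyRange_one]
      rw [show ((cs.length:Int) - (l:Int) - 0).toNat = cs.length - l by omega]
      rw [List.map_map]
      refine List.map_congr_left ?_
      intro k hk
      have hk' : k < cs.length - l := List.mem_range.1 hk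
      have t1 : (0:Int) + (k:Int) = ((k:Nat):Int) := by ring
      have g1 : cs[k]? = some (cs[k]'(by omega)) := List.getElem?_eq_getElem (by omega)
      have g2 : cs[k+l]? = some (cs[k+l]'(by omega)) := List.getElem?_eq_getElem (by omega)
      simp only [Function.comp_apply, t1, ← Nat.cast_add, PySem.List.pyGet?_natCast, g1, g2,
        Option.getD_some, Option.some.injEq]
    rw [hm, pref_char]
    simp only [zero_add, List.singleton_append]
    rw [PySem.List.pyRange_one, PySem.List.pyRange_one,
      show ((cs.length:Int) - (l:Int)*3 - 0).toNat = cs.length - 3*l by omega,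
      show ((cs.length:Int) - 3*(l:Int) - 0).toNat = cs.length - 3*l by omega]
    simp only [zero_add]
    rw [List.foldl_map, List.foldl_map]
    apply PySem.List.foldl_congr_mem
    intro d' j hj
    have hj' : j + 3*l < cs.length := by
      have := List.mem_range.1 hj; omega
    -- rewrite A's slice bounds to Nat casts
    rw [show (j:Int) + (l:Int)*0 = ((j:Nat):Int) by ring,
      show (j:Int) + (l:Int)*1 = ((j+l:Nat):Int) by push_cast; ring,
      show (j:Int) + (l:Int)*2 = ((j+2*l:Nat):Int) by push_cast; ring,
      show (j:Int) + (l:Int)*3 = ((j+3*l:Nat):Int) by push_cast; ring,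
      PySem.List.slice_natCast, PySem.List.slice_natCast, PySem.List.slice_natCast,
      show j+l-j = l by omega, show j+2*l-(j+l) = l by omega, show j+3*l-(j+2*l) = l by omega]
    -- rewrite B's prefix lookups
    have hmlen : ((List.range (cs.length - l)).map (fun k => if cs[k]? = cs[k+l]? then (1:Int) else 0)).length = cs.length - l := by
      simp
    rw [show (j:Int) + 2*(l:Int) = ((j+2*l:Nat):Int) by push_cast; ring,
      PySem.List.pyGet?_natCast, PySem.List.pyGet?_natCast,
      pref_get _ _ (by rw [hmlen]; omega), pref_get _ _ (by rw [hmlen]; omega)]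
    simp only [Option.getD_some]
    have hmi : ∀ (d : PySem.Dict String Int) k, d.modify k 0 (· + 1) = d.insert k (d.getD k 0 + 1) :=
      fun _ _ => rfl
    rw [hmi]
    refine if_congr ?_ rfl rfl
    rw [take_drop_eq_iff, take_drop_eq_iff, window_iff cs l j (by omega)]
    exact pair_iff cs l j
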